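-- pv_equiv track=rewrite | github.com/openpreserve/jpylyzer | jpylyzer.py | listContainsConsecutiveNumbers
-- ===== SOURCE A (Python) =====
-- def listContainsConsecutiveNumbers(list):
-- 	# Takes list and returns True if items are consecutive numbers,
-- 	# and False otherwise
--
-- 	containsConsecutiveNumbers=True
--
-- 	numberOfElements=len(list)
--
-- 	try:
-- 		for i in range(1,numberOfElements):
-- 			if list[i] - list[i-1] != 1:
-- 				containsConsecutiveNumbers=False
-- 	except:
-- 		containsConsecutiveNumbers=False
--
-- 	return(containsConsecutiveNumbers)
-- ===== SOURCE B (Python) =====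
-- def listContainsConsecutiveNumbers(list):
-- 	# Build the expected consecutive run from the first element and
-- 	# compare the whole list against it in one pass.
-- 	n = len(list)
-- 	if n == 0:
-- 		return True
-- 	try:
-- 		return list == [list[0] + k for k in range(n)]
-- 	except:
-- 		return False
-- ===== Notes on version B (the rewrite author's own statement) =====
-- stated objective: alternative
-- what changed: B builds the expected consecutive sequence starting at the first element and compares it to the whole list with one equality test, instead of A's running-flag loop over adjacent differences.
import Mathlib
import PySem

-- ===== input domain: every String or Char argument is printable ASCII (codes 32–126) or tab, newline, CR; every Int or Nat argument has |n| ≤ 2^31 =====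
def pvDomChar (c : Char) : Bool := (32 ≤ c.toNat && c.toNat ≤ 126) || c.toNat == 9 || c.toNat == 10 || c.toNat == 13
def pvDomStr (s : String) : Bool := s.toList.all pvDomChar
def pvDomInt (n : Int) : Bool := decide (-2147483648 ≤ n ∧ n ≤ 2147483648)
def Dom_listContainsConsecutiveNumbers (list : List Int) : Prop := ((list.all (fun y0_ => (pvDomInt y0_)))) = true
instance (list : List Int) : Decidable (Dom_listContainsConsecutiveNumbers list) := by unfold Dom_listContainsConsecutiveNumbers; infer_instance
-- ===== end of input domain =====

-- B replaces A's running-flag scan of adjacent differences by building the expected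
-- consecutive sequence from the first element and one whole-list equality test (alternative decomposition).


-- ===== PORT A =====
-- A's loop over range(1, n), updating the flag from each adjacent difference.
-- list[i] is ported with pyGet?; the 'none' (IndexError → except) branch sets the
-- flag to false (on a List Int the indices are always in range, so it never fires).
def listContainsConsecutiveNumbers (list : List Int) : Bool :=
  let numberOfElements : Int := list.length
  (PySem.List.pyRange 1 numberOfElements 1).foldl
    (fun containsConsecutiveNumbers i =>
      match PySem.List.pyGet? list i, PySem.List.pyGet? list (i - 1) with
      | some a, some b => if a - b ≠ 1 then false else containsConsecutiveNumbers
      | _, _ => false)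
    true

-- ===== PORT B =====
def listContainsConsecutiveNumbers_alt (list : List Int) : Bool :=
  let n : Int := list.length
  if n = 0 then true
  else list == (PySem.List.pyRange 0 n 1).map (fun k => PySem.List.pyGetD list 0 0 + k)

-- ===== PRECONDITION & SPEC =====
def Spec_listContainsConsecutiveNumbers (list : List Int) (out : Bool) : Prop := out = listContainsConsecutiveNumbers_alt list
instance (list : List Int) (out : Bool) : Decidable (Spec_listContainsConsecutiveNumbers list out) := by unfold Spec_listContainsConsecutiveNumbers; infer_instance

-- ===== CLAIM (what is proved, stated in full; the proofs are below) =====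
def Claim_equal_listContainsConsecutiveNumbers : Prop := ∀ (list : List Int), Dom_listContainsConsecutiveNumbers list → Spec_listContainsConsecutiveNumbers list (listContainsConsecutiveNumbers list)

-- ===== LEMMAS AND PROOFS =====

-- the fold keeps the flag true iff every visited index passes the test
theorem pv_foldl_and {α : Type} (p : α → Bool) (l : List α) (b : Bool) :
    l.foldl (fun flag i => p i && flag) b = (b && l.all p) := by
  induction l generalizing b with
  | nil => simp
  | cons hd tl ih =>
      simp only [List.foldl_cons, List.all_cons, ih]
      cases b <;> cases p hd <;> simp

theorem pv_A_char (list : List Int) :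
    listContainsConsecutiveNumbers list =
      (PySem.List.pyRange 1 (list.length : Int) 1).all
        (fun i =>
          match PySem.List.pyGet? list i, PySem.List.pyGet? list (i - 1) with
          | some a, some b => a - b == 1
          | _, _ => false) := by
  unfold listContainsConsecutiveNumbers
  rw [show
      (fun (containsConsecutiveNumbers : Bool) (i : Int) =>
        match PySem.List.pyGet? list i, PySem.List.pyGet? list (i - 1) with
        | some a, some b => if a - b ≠ 1 then false else containsConsecutiveNumbers
        | _, _ => false)
      = fun flag i =>
        (match PySem.List.pyGet? list i, PySem.List.pyGet? list (i - 1) with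
         | some a, some b => a - b == 1
         | _, _ => false) && flag from ?_]
  · exact (pv_foldl_and _ _ true).trans (by simp)
  · funext flag i
    cases PySem.List.pyGet? list i with
    | none => simp
    | some a =>
        cases PySem.List.pyGet? list (i - 1) with
        | none => simp
        | some b => by_cases hv : a - b = 1 <;> simp [hv]

theorem pv_A_true_iff (list : List Int) :
    listContainsConsecutiveNumbers list = true ↔
      ∀ k : Nat, (h : k + 1 < list.length) → list[k + 1] - list[k] = 1 := by
  rw [pv_A_char, List.all_eq_true]
  constructor
  · intro H k h
    have hm : ((k : Int) + 1) ∈ PySem.List.pyRange 1 (list.length : Int) 1 := by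
      rw [PySem.List.mem_pyRange_one]; omega
    have hA := H _ hm
    rw [show ((k : Int) + 1 - 1) = (k : Int) from by ring,
        PySem.List.pyGet?_ofNat list k (by omega),
        show ((k : Int) + 1) = ((k + 1 : Nat) : Int) from by push_cast; ring,
        PySem.List.pyGet?_ofNat list (k + 1) h] at hA
    simpa using hA
  · intro H i hi
    rw [PySem.List.mem_pyRange_one] at hi
    obtain ⟨h1, h2⟩ := hi
    obtain ⟨k, hik, hkl⟩ : ∃ k : Nat, i = (k : Int) + 1 ∧ k + 1 < list.length :=
      ⟨(i - 1).toNat, by omega, by omega⟩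
    subst hik
    rw [show ((k : Int) + 1 - 1) = (k : Int) from by ring,
        PySem.List.pyGet?_ofNat list k (by omega),
        show ((k : Int) + 1) = ((k + 1 : Nat) : Int) from by push_cast; ring,
        PySem.List.pyGet?_ofNat list (k + 1) hkl]
    simpa using H k hkl

theorem pv_B_true_iff (list : List Int) :
    listContainsConsecutiveNumbers_alt list = true ↔
      ∀ k : Nat, (h : k < list.length) → list[k] = list.headD 0 + k := by
  unfold listContainsConsecutiveNumbers_alt
  cases list with
  | nil => simp
  | cons a t =>
    rw [if_neg (by intro hc; rw [List.length_cons] at hc; push_cast at hc; omega)]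
    rw [show ((a :: t).length : Int) = ((a :: t).length : Nat) from rfl]
    have h0 : PySem.List.pyGetD (a :: t) 0 0 = a := by
      simp [PySem.List.pyGetD_ofNat']
    rw [beq_iff_eq, h0]
    have hlen : ((PySem.List.pyRange 0 ((a :: t).length : Int) 1).map
        (fun k => a + k)).length = (a :: t).length := by
      simp [PySem.List.length_pyRange_one]
    constructor
    · intro H k h
      have := congrArg (fun l => l[k]?) H
      simp only at this
      rw [List.getElem?_eq_getElem h,
          List.getElem?_eq_getElem (by omega : k < ((PySem.List.pyRange 0 ((a :: t).length : Int) 1).map (fun k => a + k)).length)] at this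
      rw [List.getElem_map, PySem.List.getElem_pyRange_one] at this
      simp only [Option.some.injEq] at this
      simpa using this
    · intro H
      refine List.ext_getElem (by omega) ?_
      intro k h1 h2
      rw [List.getElem_map, PySem.List.getElem_pyRange_one]
      simpa using H k h1

theorem pv_props_iff (list : List Int) :
    (∀ k : Nat, (h : k + 1 < list.length) → list[k + 1] - list[k] = 1) ↔
      (∀ k : Nat, (h : k < list.length) → list[k] = list.headD 0 + k) := by
  constructor
  · intro H k
    induction k with
    | zero =>
        intro h
        cases list with
        | nil => simp at h
        | cons a t => simp
    | succ m ih =>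
        intro h
        have h1 := H m (by omega)
        have h2 := ih (by omega)
        push_cast
        omega
  · intro H k h
    have h1 := H (k + 1) h
    have h2 := H k (by omega)
    push_cast at h1
    omega

-- ===== VERDICT (by name: the statement is the Claim_ definition above) =====
theorem listContainsConsecutiveNumbers_spec : Claim_equal_listContainsConsecutiveNumbers := by
  intro list _
  unfold Spec_listContainsConsecutiveNumbers
  rw [Bool.eq_iff_iff, pv_A_true_iff, pv_B_true_iff]
  exact pv_props_iff list
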